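-- pv_equiv track=rewrite | github.com/Brandon7771066/TI-Sigma-New | social_media_approval_system.py | _calculate_numerology_score
-- ===== SOURCE A (Python) =====
-- def _calculate_numerology_score(text: str) -> int:
--     """Calculate numerology score from text"""
--     letter_values = {
--         'A': 1, 'B': 2, 'C': 3, 'D': 4, 'E': 5, 'F': 6, 'G': 7, 'H': 8, 'I': 9,
--         'J': 1, 'K': 2, 'L': 3, 'M': 4, 'N': 5, 'O': 6, 'P': 7, 'Q': 8, 'R': 9,
--         'S': 1, 'T': 2, 'U': 3, 'V': 4, 'W': 5, 'X': 6, 'Y': 7, 'Z': 8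
--     }
--
--     total = 0
--     for char in text.upper():
--         if char.isalpha():
--             total += letter_values.get(char, 0)
--
--     while total > 33 and total not in [11, 22, 33]:
--         total = sum(int(d) for d in str(total))
--         if total in [11, 22, 33]:
--             break
--
--     return min(total, 33)
-- ===== SOURCE B (Python) =====
-- def _reduce(n: int) -> int:
--     if n <= 33:
--         return n
--     s = 0
--     while n:
--         s += n % 10
--         n //= 10
--     return _reduce(s)
--
--
-- def _calculate_numerology_score(text: str) -> int:
--     counts = {}
--     for ch in text.upper():
--         counts[ch] = counts.get(ch, 0) + 1
--     total = 0
--     for k in range(26):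
--         total += (k % 9 + 1) * counts.get(chr(65 + k), 0)
--     return _reduce(total)
-- ===== Notes on version B (the rewrite author's own statement) =====
-- stated objective: simpler
-- what changed: Replaces A's per-character dict-lookup-and-accumulate pass by a two-stage pipeline (build a character-count dict in one pass, then sum value*count over the 26 letters using the closed form k % 9 + 1), and replaces A's while-loop digit reduction with master-number checks and min(...,33) by a plain recursion that digit-sums arithmetically until the value is at most 33 (the master checks and the min are provably redundant).
import Mathlib
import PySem

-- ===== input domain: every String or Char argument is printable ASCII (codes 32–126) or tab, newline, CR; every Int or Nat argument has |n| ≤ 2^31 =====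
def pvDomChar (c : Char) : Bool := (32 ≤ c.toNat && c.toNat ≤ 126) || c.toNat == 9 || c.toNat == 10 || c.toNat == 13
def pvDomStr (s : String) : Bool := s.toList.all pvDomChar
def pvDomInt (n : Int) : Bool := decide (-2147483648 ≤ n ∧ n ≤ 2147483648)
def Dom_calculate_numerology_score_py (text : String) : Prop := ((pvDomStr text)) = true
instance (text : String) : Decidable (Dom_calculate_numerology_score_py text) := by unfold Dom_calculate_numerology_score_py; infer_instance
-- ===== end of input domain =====

-- B replaces A's per-character dict-lookup pass by a two-stage pipeline (build a character-count
-- dict, then sum value*count over the 26 letters with the closed form k % 9 + 1), and replaces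
-- A's while-loop digit reduction with master-number checks and min(...,33) by a plain recursion
-- that digit-sums arithmetically until the value is ≤ 33 (objective: simpler; same cost).

-- ===== PORT A =====
def pvLetterValuesA : PySem.Dict Char Int := PySem.Dict.ofList
  [('A',1),('B',2),('C',3),('D',4),('E',5),('F',6),('G',7),('H',8),('I',9),
   ('J',1),('K',2),('L',3),('M',4),('N',5),('O',6),('P',7),('Q',8),('R',9),
   ('S',1),('T',2),('U',3),('V',4),('W',5),('X',6),('Y',7),('Z',8)]

-- sum(int(d) for d in str(total)); the `.getD 0` is int()'s ValueError branch, unreachable here: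
-- every call site has total > 33, so every character of str(total) is a digit
def pvDigitSumStrA (t : Int) : Int :=
  ((PySem.Int.toChars t).map (fun d => (PySem.Int.ofChars? [d]).getD 0)).sum

-- the while-loop of A; fuel is only a totality guard (never exhausted: each pass shrinks total)
def pvReduceA : Nat → Int → Int
  | 0, total => total
  | fuel + 1, total =>
    if total > 33 ∧ ¬ total ∈ ([11, 22, 33] : List Int) then
      let t := pvDigitSumStrA total
      if t ∈ ([11, 22, 33] : List Int) then t else pvReduceA fuel t
    else total

def calculate_numerology_score_py (text : String) : Int :=
  let total := (PySem.Str.upper text).toList.foldl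
    (fun tot ch => if PySem.Chars.isalpha ch then tot + pvLetterValuesA.getD ch 0 else tot) 0
  min (pvReduceA (total.toNat + 1) total) 33

-- ===== PORT B =====
-- _reduce's inner loop 'while n: s += n % 10; n //= 10'; n is a nonnegative remainder at every
-- call, so the test 'n' is ported as 0 < n (exact there; it also makes the recursion well-founded)
def pvDigitSumLoopB (n s : Int) : Int :=
  if _h : 0 < n then pvDigitSumLoopB (PySem.Int.floordiv n 10) (s + PySem.Int.mod n 10) else s
termination_by n.toNat
decreasing_by
  rw [PySem.Int.floordiv_eq_ediv_of_pos (by omega : (0:Int) < 10)]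
  omega

-- the digit-sum loop computes the sum of the base-10 digits (stated here because _reduce's
-- termination proof cites it)
theorem pv_dsB_digits (m : Nat) : ∀ (s : Int),
    pvDigitSumLoopB (m : Int) s = s + ((Nat.digits 10 m).sum : Int) := by
  induction m using Nat.strong_induction_on with
  | _ m ih =>
    intro s
    rw [pvDigitSumLoopB]
    by_cases hm : 0 < (m : Int)
    · rw [dif_pos hm]
      have hmn : 0 < m := by exact_mod_cast hm
      rw [show PySem.Int.floordiv (m : Int) 10 = ((m / 10 : Nat) : Int) from
            PySem.Int.floordiv_natCast m 10,
          show PySem.Int.mod (m : Int) 10 = ((m % 10 : Nat) : Int) from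
            PySem.Int.mod_natCast m 10,
          ih (m / 10) (by omega)]
      rw [Nat.digits_def' (by norm_num : 1 < 10) hmn]
      simp only [List.sum_cons]
      push_cast; ring

    · rw [dif_neg hm]
      have : m = 0 := by omega
      subst this; simp

-- the digit sum of m ≥ 10 is strictly smaller than m (cited by _reduce's termination proof)
theorem pv_digitsSum_lt (m : Nat) (h : 10 ≤ m) : (Nat.digits 10 m).sum < m := by
  rw [Nat.digits_def' (by norm_num : 1 < 10) (by omega : 0 < m), List.sum_cons]
  have hle := Nat.digit_sum_le 10 (m / 10)
  omega

theorem pv_dsB_lt (n : Int) (h : 33 < n) :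
    0 ≤ pvDigitSumLoopB n 0 ∧ (pvDigitSumLoopB n 0).toNat < n.toNat := by
  have h0 : (0:Int) ≤ n := by omega
  lift n to Nat using h0 with m
  rw [pv_dsB_digits m 0, zero_add]
  have hlt := pv_digitsSum_lt m (by omega)
  constructor
  · exact_mod_cast Nat.zero_le _
  · rw [Int.toNat_natCast, Int.toNat_natCast]
    exact hlt

-- _reduce: if n <= 33 return n else recurse on the arithmetic digit sum
def pvReduceB (n : Int) : Int :=
  if _h : n ≤ 33 then n else pvReduceB (pvDigitSumLoopB n 0)
termination_by n.toNat
decreasing_by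
  exact (pv_dsB_lt n (by omega)).2

def pvCountsB (l : List Char) : PySem.Dict Char Int :=
  l.foldl (fun d ch => d.insert ch (d.getD ch 0 + 1)) PySem.Dict.empty

def calculate_numerology_score_py_alt (text : String) : Int :=
  let counts := pvCountsB (PySem.Str.upper text).toList
  let total := (PySem.List.pyRange 0 26 1).foldl
    (fun tot k => tot + (PySem.Int.mod k 9 + 1) * counts.getD (Char.ofNat (65 + k).toNat) 0) 0
  pvReduceB total

-- ===== PRECONDITION & SPEC =====
def Spec_calculate_numerology_score_py (text : String) (out : Int) : Prop := out = calculate_numerology_score_py_alt text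
instance (text : String) (out : Int) : Decidable (Spec_calculate_numerology_score_py text out) := by unfold Spec_calculate_numerology_score_py; infer_instance

-- ===== CLAIM (what is proved, stated in full; the proofs are below) =====
def Claim_equal_calculate_numerology_score_py : Prop := ∀ (text : String), Dom_calculate_numerology_score_py text → Spec_calculate_numerology_score_py text (calculate_numerology_score_py text)

-- ===== LEMMAS AND PROOFS =====

-- the per-letter sum of B, with counts already rewritten to List.count
def pvSumB (l : List Char) : Int :=
  ((PySem.List.pyRange 0 26 1).map
    (fun k => (PySem.Int.mod k 9 + 1) * (l.count (Char.ofNat (65 + k).toNat) : Int))).sum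

theorem pv_sumB_nil : pvSumB [] = 0 := by decide

set_option maxRecDepth 8192 in
theorem pv_digitVal_digitChar (k : Nat) (h : k < 10) :
    (PySem.Int.ofChars? [Nat.digitChar k]).getD 0 = (k : Int) := by
  interval_cases k <;> decide

theorem pv_toDigitsCore_sum (fuel : Nat) :
    ∀ (n : Nat) (acc : List Char), n < fuel →
    ((Nat.toDigitsCore 10 fuel n acc).map (fun d => (PySem.Int.ofChars? [d]).getD 0)).sum
      = ((Nat.digits 10 n).sum : Int)
        + (acc.map (fun d => (PySem.Int.ofChars? [d]).getD 0)).sum := by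
  induction fuel with
  | zero => intro n acc h; omega
  | succ fuel ih =>
    intro n acc h
    simp only [Nat.toDigitsCore]
    by_cases hq : n / 10 = 0
    · simp only [hq, if_true, List.map_cons, List.sum_cons]
      rw [pv_digitVal_digitChar (n % 10) (by omega)]
      by_cases hn : n = 0
      · subst hn; simp
      · rw [Nat.digits_def' (by norm_num : 1 < 10) (by omega), hq, Nat.digits_zero]
        push_cast; simp
    · rw [if_neg hq, ih (n / 10) _ (by omega)]
      simp only [List.map_cons, List.sum_cons]
      rw [pv_digitVal_digitChar (n % 10) (by omega),
        Nat.digits_def' (by norm_num : 1 < 10) (by omega : 0 < n)]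
      simp only [List.sum_cons]
      push_cast; ring

theorem pv_dsA_digits (m : Nat) :
    pvDigitSumStrA (m : Int) = ((Nat.digits 10 m).sum : Int) := by
  unfold pvDigitSumStrA
  rw [show PySem.Int.toChars (m : Int) = Nat.toDigits 10 m by
      simp [PySem.Int.toChars]]
  rw [Nat.toDigits, pv_toDigitsCore_sum (m + 1) m [] (by omega)]
  simp

theorem pv_ds_eq (t : Int) (h : 0 ≤ t) : pvDigitSumStrA t = pvDigitSumLoopB t 0 := by
  lift t to Nat using h with m
  rw [pv_dsA_digits m, pv_dsB_digits m 0, zero_add]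

-- A's reduction loop (with its redundant master-number break and the final min) agrees with
-- B's plain reduce-until-≤33 recursion, for nonnegative totals and sufficient fuel
theorem pv_reduce_eq (fuel : Nat) : ∀ (t : Int), 0 ≤ t → t.toNat < fuel →
    min (pvReduceA fuel t) 33 = pvReduceB t := by
  induction fuel with
  | zero => intro t ht hf; omega
  | succ fuel ih =>
    intro t ht hf
    by_cases h33 : t ≤ 33
    · rw [pvReduceB, dif_pos h33]
      simp only [pvReduceA]
      rw [if_neg (fun hcond => absurd hcond.1 (by omega))]
      omega
    · have hcond : t > 33 ∧ ¬ t ∈ ([11, 22, 33] : List Int) := by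
        constructor
        · omega
        · simp only [List.mem_cons, List.not_mem_nil, or_false]; omega
      simp only [pvReduceA, if_pos hcond]
      rw [pvReduceB, dif_neg h33, pv_ds_eq t ht]
      obtain ⟨hm0, hmlt⟩ := pv_dsB_lt t (by omega)
      by_cases hmaster : pvDigitSumLoopB t 0 ∈ ([11, 22, 33] : List Int)
      · rw [if_pos hmaster]
        have hle : pvDigitSumLoopB t 0 ≤ 33 := by
          simp only [List.mem_cons, List.not_mem_nil, or_false] at hmaster; omega
        rw [pvReduceB, dif_pos hle]
        omega
      · rw [if_neg hmaster]
        exact ih _ hm0 (by omega)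

-- for every ASCII char c, the indicator sum over the 26 letters equals A's per-char increment
set_option maxRecDepth 32768 in
theorem pv_ind_range : ∀ m ∈ List.range 127,
    ((PySem.List.pyRange 0 26 1).map
      (fun k => (PySem.Int.mod k 9 + 1) *
        (if Char.ofNat m = Char.ofNat (65 + k).toNat then (1:Int) else 0))).sum
      = (if PySem.Chars.isalpha (Char.ofNat m)
         then pvLetterValuesA.getD (Char.ofNat m) 0 else 0) := by
  decide

theorem pv_ind (c : Char) (h : c.toNat ≤ 126) :
    ((PySem.List.pyRange 0 26 1).map
      (fun k => (PySem.Int.mod k 9 + 1) *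
        (if c = Char.ofNat (65 + k).toNat then (1:Int) else 0))).sum
      = (if PySem.Chars.isalpha c then pvLetterValuesA.getD c 0 else 0) := by
  have := pv_ind_range c.toNat (by simp [List.mem_range]; omega)
  rwa [Char.ofNat_toNat] at this

theorem pv_sumB_cons (c : Char) (l : List Char) (h : c.toNat ≤ 126) :
    pvSumB (c :: l)
      = pvSumB l + (if PySem.Chars.isalpha c then pvLetterValuesA.getD c 0 else 0) := by
  unfold pvSumB
  rw [← pv_ind c h, ← List.sum_map_add]
  congr 1
  apply List.map_congr_left
  intro k _
  have hcnt : ((c :: l).count (Char.ofNat (65 + k).toNat) : Int)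
      = (l.count (Char.ofNat (65 + k).toNat) : Int)
        + (if c = Char.ofNat (65 + k).toNat then (1:Int) else 0) := by
    rw [List.count_cons]
    by_cases hc : c = Char.ofNat (65 + k).toNat
    · rw [if_pos (beq_iff_eq.mpr hc), if_pos hc]; push_cast; ring
    · rw [if_neg (by simpa using hc), if_neg hc]; push_cast; ring
  rw [hcnt]; ring

-- A's character fold computes pvSumB of the same list
theorem pv_foldA_eq_sumB (l : List Char) (hl : ∀ c ∈ l, c.toNat ≤ 126) : ∀ (t : Int),
    l.foldl (fun tot ch =>
        if PySem.Chars.isalpha ch then tot + pvLetterValuesA.getD ch 0 else tot) t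
      = t + pvSumB l := by
  induction l with
  | nil => intro t; rw [pv_sumB_nil]; simp
  | cons c l ih =>
    intro t
    simp only [List.foldl_cons]
    rw [ih (fun x hx => hl x (List.mem_cons_of_mem c hx)),
        pv_sumB_cons c l (hl c List.mem_cons_self)]
    split_ifs <;> ring

-- B's range fold computes pvSumB (counts dict rewritten to List.count, then foldl_add)
theorem pv_foldB_eq_sumB (l : List Char) :
    (PySem.List.pyRange 0 26 1).foldl
      (fun tot k => tot + (PySem.Int.mod k 9 + 1) * (pvCountsB l).getD (Char.ofNat (65 + k).toNat) 0) 0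
      = pvSumB l := by
  have hget : ∀ (c : Char), (pvCountsB l).getD c 0 = (l.count c : Int) := by
    intro c
    unfold pvCountsB
    rw [PySem.Dict.getD_foldl_insert_add_one, PySem.Dict.getD_empty, zero_add]
  simp only [hget]
  rw [PySem.List.foldl_add, zero_add]
  rfl

theorem pv_sumB_nonneg (l : List Char) : 0 ≤ pvSumB l := by
  unfold pvSumB
  apply List.sum_nonneg
  intro x hx
  simp only [List.mem_map] at hx
  obtain ⟨k, _, rfl⟩ := hx
  have := PySem.Int.mod_nonneg k (by omega : (0:Int) < 9)
  positivity

theorem pv_toNat_ofNat (k : Nat) (h : k ≤ 126) : (Char.ofNat k).toNat = k := by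
  have hv : Nat.isValidChar k := Or.inl (by omega)
  rw [Char.ofNat, dif_pos hv]
  simp [Char.toNat, Char.ofNatAux]

theorem pv_upperChar_bound (c : Char) (h : c.toNat ≤ 126) :
    (PySem.Chars.upperChar c).toNat ≤ 126 := by
  unfold PySem.Chars.upperChar
  split_ifs
  · rw [pv_toNat_ofNat _ (by omega)]; omega
  · exact h

-- ===== VERDICT (by name: the statement is the Claim_ definition above) =====
theorem calculate_numerology_score_py_spec : Claim_equal_calculate_numerology_score_py := by
  intro text hdom
  unfold Spec_calculate_numerology_score_py
  unfold calculate_numerology_score_py calculate_numerology_score_py_alt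
  have hchars : ∀ c ∈ (PySem.Str.upper text).toList, c.toNat ≤ 126 := by
    intro c hc
    rw [PySem.Str.upper] at hc
    simp only [String.toList_ofList, PySem.Chars.upper, List.mem_map] at hc
    obtain ⟨c0, hc0, rfl⟩ := hc
    have hd : pvDomChar c0 = true := by
      have := hdom
      unfold Dom_calculate_numerology_score_py pvDomStr at this
      rw [List.all_eq_true] at this
      exact this c0 hc0
    apply pv_upperChar_bound
    simp [pvDomChar] at hd
    omega
  simp only
  rw [pv_foldA_eq_sumB _ hchars 0, pv_foldB_eq_sumB, zero_add]
  exact pv_reduce_eq _ _ (pv_sumB_nonneg _) (by omega)
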